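-- pv_equiv track=rewrite | github.com/CharlesWithC/HubBackend | src/functions.py | b62encode
-- ===== SOURCE A (Python) =====
-- def b62encode(d):
--     ret = ""
--     l = "0123456789abcdefghijklmnopqrstuvwxyzABCDEFGHIJKLMNOPQRSTUVWXYZ"
--     if d == 0:
--         return l[0]
--     flag = ""
--     if d < 0:
--         flag = "-"
--         d = abs(d)
--     while d:
--         ret += l[d % 62]
--         d //= 62
--     return flag + ret[::-1]
-- ===== SOURCE B (Python) =====
-- def b62encode(d):
--     l = "0123456789abcdefghijklmnopqrstuvwxyzABCDEFGHIJKLMNOPQRSTUVWXYZ"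
--     res = "-" if d < 0 else ""
--     n = abs(d)
--     p = 1
--     while p * 62 <= n:
--         p *= 62
--     while p:
--         res += l[n // p]
--         n %= p
--         p //= 62
--     return res
-- ===== Notes on version B (the rewrite author's own statement) =====
-- stated objective: alternative
-- what changed: Replaces the accumulate-LSB-digits-then-reverse loop with a different algorithm: first find the largest radix power not exceeding |d|, then emit digits most-significant-first via floor-division and remainder while shrinking the power, so there is no reversal pass and no special case for zero.
import Mathlib
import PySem

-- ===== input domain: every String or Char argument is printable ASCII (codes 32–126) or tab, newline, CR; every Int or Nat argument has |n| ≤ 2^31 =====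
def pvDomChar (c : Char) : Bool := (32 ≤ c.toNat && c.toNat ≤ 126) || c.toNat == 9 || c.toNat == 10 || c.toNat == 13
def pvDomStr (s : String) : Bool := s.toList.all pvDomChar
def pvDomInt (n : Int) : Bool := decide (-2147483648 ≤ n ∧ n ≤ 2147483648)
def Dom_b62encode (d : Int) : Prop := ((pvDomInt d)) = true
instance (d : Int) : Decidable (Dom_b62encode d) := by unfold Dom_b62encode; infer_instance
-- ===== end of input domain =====

-- B replaces A's accumulate-then-reverse loop with a largest-radix-power search followed by most-significant-first digit emission; alternative algorithm, same cost.


-- ===== PORT A =====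
-- alphabet string l as a list of code points
def b62A_l : List Char := "0123456789abcdefghijklmnopqrstuvwxyzABCDEFGHIJKLMNOPQRSTUVWXYZ".toList

-- the while loop: ret += l[d % 62]; d //= 62   (d is a positive Nat here, as after abs in A)
def b62A_loop : Nat → List Char → List Char
  | 0, ret => ret
  | (d+1), ret =>
      b62A_loop ((d+1) / 62) (ret ++ [((PySem.List.pyGet? b62A_l (((d+1 : Nat) % 62 : Nat) : Int)).getD ' ')])
decreasing_by exact Nat.div_lt_self (Nat.succ_pos d) (by omega)

def b62encode (d : Int) : String :=
  if d = 0 then String.ofList [(PySem.List.pyGet? b62A_l 0).getD ' ']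
  else
    let flag : List Char := if d < 0 then ['-'] else []
    -- d = abs(d): after the sign branch the loop runs on |d| > 0
    let ret := b62A_loop d.natAbs []
    -- ret[::-1] (PySem.List.slice? … (-1) = reverse)
    String.ofList (flag ++ ret.reverse)

-- ===== PORT B =====
def b62B_l : List Char := "0123456789abcdefghijklmnopqrstuvwxyzABCDEFGHIJKLMNOPQRSTUVWXYZ".toList

-- l[i] for an in-range Nat index
def b62B_dig (i : Nat) : Char := (PySem.List.pyGet? b62B_l ((i : Nat) : Int)).getD ' '

-- first loop: while p * 62 <= n: p *= 62   (the 1 ≤ p conjunct only makes the loop total; p starts at 1 and only grows)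
def b62B_pow (n p : Nat) : Nat :=
  if 1 ≤ p ∧ p * 62 ≤ n then b62B_pow n (p * 62) else p
termination_by n + 1 - p
decreasing_by omega

-- second loop: while p: res += l[n // p]; n %= p; p //= 62
def b62B_loop (n p : Nat) (res : List Char) : List Char :=
  if p = 0 then res else b62B_loop (n % p) (p / 62) (res ++ [b62B_dig (n / p)])
termination_by p
decreasing_by exact Nat.div_lt_self (by omega) (by omega)

def b62encode_alt (d : Int) : String :=
  let res : List Char := if d < 0 then ['-'] else []
  let n := d.natAbs
  String.ofList (b62B_loop n (b62B_pow n 1) res)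

-- ===== PRECONDITION & SPEC =====
def Spec_b62encode (d : Int) (out : String) : Prop := out = b62encode_alt d
instance (d : Int) (out : String) : Decidable (Spec_b62encode d out) := by unfold Spec_b62encode; infer_instance

-- ===== CLAIM (what is proved, stated in full; the proofs are below) =====
def Claim_equal_b62encode : Prop := ∀ (d : Int), Dom_b62encode d → Spec_b62encode d (b62encode d)

-- ===== LEMMAS AND PROOFS =====
-- proof-side helper: the digits of n most-significant-first, no padding
def b62E : Nat → List Char :=
  fun n => if _h : n = 0 then [] else b62E (n / 62) ++ [b62B_dig (n % 62)]
termination_by n => n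
decreasing_by exact Nat.div_lt_self (by omega) (by omega)

-- proof-side helper: the last k base-62 digits of n, most-significant-first, zero-padded to length k
def b62F : Nat → Nat → List Char
  | 0, _ => []
  | (k+1), n => b62F k (n / 62) ++ [b62B_dig (n % 62)]

theorem b62_l_eq : b62B_l = b62A_l := rfl

theorem b62E_unfold (n : Nat) (h : n ≠ 0) : b62E n = b62E (n / 62) ++ [b62B_dig (n % 62)] := by
  rw [b62E]; simp [h]

theorem b62A_loop_reverse (n : Nat) (ret : List Char) :
    (b62A_loop n ret).reverse = b62E n ++ ret.reverse := by
  fun_induction b62A_loop n ret with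
  | case1 ret => simp [b62E]
  | case2 d ret ih =>
      rw [ih, b62E_unfold (d+1) (Nat.succ_ne_zero d)]
      simp [b62B_dig, b62_l_eq]

theorem b62F_split (k n : Nat) (h : n < 62 ^ (k + 2)) :
    b62F (k + 2) n = [b62B_dig (n / 62 ^ (k + 1))] ++ b62F (k + 1) (n % 62 ^ (k + 1)) := by
  induction k generalizing n with
  | zero =>
      show b62F 1 (n / 62) ++ [b62B_dig (n % 62)] = [b62B_dig (n / 62 ^ 1)] ++ (b62F 0 ((n % 62^1) / 62) ++ [b62B_dig ((n % 62 ^ 1) % 62)])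
      have h1 : n / 62 < 62 := Nat.div_lt_of_lt_mul (by rw [show (62:ℕ)*62 = 62^(0+2) from by ring]; exact h)
      have h2 : n / 62 % 62 = n / 62 := Nat.mod_eq_of_lt h1
      simp [b62F, pow_one, Nat.mod_mod_of_dvd _ (by norm_num : (62:ℕ) ∣ 62), h2]
  | succ k ih =>
      show b62F (k+2) (n / 62) ++ [b62B_dig (n % 62)] = _
      have hd : n / 62 < 62 ^ (k + 2) := by
        apply Nat.div_lt_of_lt_mul
        calc n < 62 ^ (k + 3) := h
        _ = 62 * 62 ^ (k+2) := by ring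
      rw [ih _ hd]
      have e1 : n / 62 / 62 ^ (k+1) = n / 62 ^ (k + 2) := by
        rw [Nat.div_div_eq_div_mul]; congr 1; ring
      have e2 : n / 62 % 62 ^ (k+1) = n % 62 ^ (k+2) / 62 := by
        rw [show (62:ℕ)^(k+2) = 62 * 62^(k+1) from by ring, Nat.mod_mul_right_div_self]
      have e3 : n % 62 ^ (k + 2) % 62 = n % 62 := Nat.mod_mod_of_dvd _ (dvd_pow_self 62 (by omega))
      show [b62B_dig (n / 62 / 62 ^ (k+1))] ++ b62F (k+1) (n / 62 % 62^(k+1)) ++ [b62B_dig (n % 62)] = [b62B_dig (n / 62 ^ (k+2))] ++ (b62F (k+1) (n % 62^(k+2) / 62) ++ [b62B_dig (n % 62^(k+2) % 62)])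
      rw [e1, e2, e3]; simp

theorem b62B_loop_pow (k : Nat) (n : Nat) (res : List Char) (h : n < 62 ^ (k + 1)) :
    b62B_loop n (62 ^ k) res = res ++ b62F (k + 1) n := by
  induction k generalizing n res with
  | zero =>
      simp only [pow_zero]
      rw [b62B_loop, if_neg (by norm_num)]
      rw [show (1:ℕ)/62 = 0 from rfl]
      simp only [Nat.mod_one, Nat.div_one]
      rw [b62B_loop, if_pos rfl]
      have hn : n % 62 = n := Nat.mod_eq_of_lt (by simpa using h)
      simp [b62F, hn]
  | succ k ih =>
      rw [b62B_loop]
      have hp : (62:ℕ) ^ (k+1) ≠ 0 := by positivity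
      rw [if_neg hp]
      have hdiv : 62 ^ (k + 1) / 62 = 62 ^ k := by
        rw [pow_succ]; omega
      rw [hdiv, ih _ _ (Nat.mod_lt _ (by positivity))]
      rw [b62F_split k n h]
      simp

theorem b62F_eq_E (k n : Nat) (hlo : 62 ^ k ≤ n) (hhi : n < 62 ^ (k + 1)) :
    b62F (k + 1) n = b62E n := by
  induction k generalizing n with
  | zero =>
      have h1 : n ≠ 0 := by simp at hlo; omega
      rw [b62E_unfold n h1]
      have h0 : n / 62 = 0 := Nat.div_eq_of_lt (by simpa using hhi)
      show b62F 0 (n/62) ++ [b62B_dig (n % 62)] = _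
      rw [h0, b62E]; simp [b62F]
  | succ k ih =>
      have h1 : n ≠ 0 := by
        have : 0 < 62 ^ (k+1) := by positivity
        omega
      rw [b62E_unfold n h1]
      show b62F (k+1) (n / 62) ++ [b62B_dig (n % 62)] = _
      rw [ih (n / 62)]
      · rw [Nat.le_div_iff_mul_le (by omega)]
        calc 62 ^ k * 62 = 62 ^ (k+1) := by ring
        _ ≤ n := hlo
      · apply Nat.div_lt_of_lt_mul
        calc n < 62 ^ (k + 2) := hhi
        _ = 62 * 62 ^ (k+1) := by ring

theorem b62B_pow_spec (n p : Nat) : 1 ≤ p → p ≤ n →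
    ∃ k, b62B_pow n p = p * 62 ^ k ∧ b62B_pow n p ≤ n ∧ n < 62 * b62B_pow n p := by
  fun_induction b62B_pow n p with
  | case1 p hcond ih =>
      intro hp hpn
      obtain ⟨k, hk, h1, h2⟩ := ih (by omega) hcond.2
      exact ⟨k + 1, by rw [hk]; ring, h1, h2⟩
  | case2 p hcond =>
      intro hp hpn
      have hx : n < p * 62 := by
        by_contra hc
        exact hcond ⟨hp, by omega⟩
      exact ⟨0, by ring, hpn, by omega⟩

theorem b62B_pow_one (n : Nat) (hn : 1 ≤ n) :
    ∃ k, b62B_pow n 1 = 62 ^ k ∧ 62 ^ k ≤ n ∧ n < 62 ^ (k + 1) := by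
  obtain ⟨k, hk, h1, h2⟩ := b62B_pow_spec n 1 le_rfl hn
  have hk' : b62B_pow n 1 = 62 ^ k := by rw [hk]; ring
  rw [hk'] at h1 h2
  exact ⟨k, hk', h1, by rw [pow_succ]; omega⟩

-- ===== VERDICT (by name: the statement is the Claim_ definition above) =====
theorem b62encode_spec : Claim_equal_b62encode := by
  intro d _
  unfold Spec_b62encode b62encode b62encode_alt
  split
  · -- d = 0 : B computes bPow 0 1 = 1, then one loop iteration emits l[0]
    subst ‹d = 0›
    have hp : b62B_pow 0 1 = 1 := by rw [b62B_pow]; norm_num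
    show String.ofList [(PySem.List.pyGet? b62A_l 0).getD ' '] = String.ofList (b62B_loop 0 (b62B_pow 0 1) (if (0:Int) < 0 then ['-'] else []))
    rw [hp]
    rw [b62B_loop, if_neg (by norm_num)]
    rw [show (1:ℕ)/62 = 0 from rfl, show (0:ℕ) % 1 = 0 from rfl]
    rw [b62B_loop, if_pos rfl]
    rfl
  · -- d ≠ 0 : |d| ≥ 1
    have hn : 1 ≤ d.natAbs := by
      rename_i h; omega
    obtain ⟨k, hk, hlo, hhi⟩ := b62B_pow_one d.natAbs hn
    show String.ofList ((if d < 0 then ['-'] else []) ++ (b62A_loop d.natAbs []).reverse) = String.ofList (b62B_loop d.natAbs (b62B_pow d.natAbs 1) (if d < 0 then ['-'] else []))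
    rw [hk, b62B_loop_pow k _ _ hhi, b62F_eq_E k _ hlo hhi]
    have h := b62A_loop_reverse d.natAbs []
    simp only [List.reverse_nil, List.append_nil] at h
    rw [h]
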